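-- pv_equiv track=rewrite | github.com/payapprojects/thaienglishcorpus | aligner.py | find_mixed
-- ===== SOURCE A (Python) =====
-- def find_mixed(ordered,cog):
--
--     longest = 0
--     temp1 = {}
--     temp2 = {}
--     for k,v in cog.items():
--         value = v[0]
--         if value.isdigit():
--             #print (k,v)
--             temp1[k] = v
--         else:
--             #print ("not",k,v)
--             temp2[k] = v
--             if len(value) > longest:
--                 longest = len(value)
--
--     for i in range(longest,0,-1):
--         for k,v in temp2.items():
--             if len(v) == i:
--                 ordered.append(k)
--
--     longest = 0
--     for k,v in temp1.items():
--         value = v[0]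
--         if len(value) > longest:
--             longest = len(value)
--
--     for i in range(longest,0,-1):
--         for k,v in temp1.items():
--             if len(v) == i:
--                 ordered.append(k)
--
--     return ordered
-- ===== SOURCE B (Python) =====
-- def find_mixed(ordered, cog):
--     """Append cog's keys to `ordered`: entries whose first value string is
--     non-numeric come first, then the numeric ones.  Within each part, keys are
--     bucketed by the number of strings in their value list and the buckets are
--     emitted from `longest` down to 1, where `longest` is the length of the
--     longest first string of that part."""
--     for digits in (False, True):
--         part = [(k, v) for k, v in cog.items() if v[0].isdigit() == digits]
--         longest = max((len(v[0]) for _, v in part), default=0)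
--         buckets = {}
--         for k, v in part:
--             buckets.setdefault(len(v), []).append(k)
--         for i in range(longest, 0, -1):
--             ordered.extend(buckets.get(i, []))
--     return ordered
-- ===== Notes on version B (the rewrite author's own statement) =====
-- stated objective: alternative
-- what changed: B splits the entries into the two parts and bucket-groups each part by value-list length in one dict-building pass, then emits buckets from longest down to 1, instead of A's rescan of the whole part for every length i in range(longest,0,-1); Pre_ excludes only inputs with an empty value list, on which A raises IndexError at v[0].
import Mathlib
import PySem

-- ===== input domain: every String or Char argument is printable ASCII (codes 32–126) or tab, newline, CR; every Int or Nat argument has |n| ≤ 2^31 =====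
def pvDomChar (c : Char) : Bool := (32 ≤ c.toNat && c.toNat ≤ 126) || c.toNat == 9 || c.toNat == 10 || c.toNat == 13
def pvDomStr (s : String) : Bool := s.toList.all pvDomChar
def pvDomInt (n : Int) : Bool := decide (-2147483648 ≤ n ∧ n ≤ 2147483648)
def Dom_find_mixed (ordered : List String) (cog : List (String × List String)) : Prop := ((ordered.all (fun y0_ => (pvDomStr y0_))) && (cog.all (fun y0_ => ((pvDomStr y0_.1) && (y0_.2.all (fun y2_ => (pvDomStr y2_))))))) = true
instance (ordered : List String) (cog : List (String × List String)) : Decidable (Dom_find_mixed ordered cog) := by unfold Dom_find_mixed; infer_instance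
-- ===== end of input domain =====

-- B bucket-groups each part by value-list length in one dict pass and emits buckets
-- longest..1, instead of A's rescan of the part for every length; like A it appends to
-- `ordered` in place — the equivalence proved is about the return value only.

-- ===== PORT A =====
-- v[0] is ported as headD ""; Python raises IndexError on an empty value list,
-- and exactly those inputs are excluded by Pre_find_mixed below.
def find_mixed (ordered : List String) (cog : List (String × List String)) : List String :=
  let s1 := cog.foldl
    (fun (st : Int × List (String × List String) × List (String × List String)) kv =>
      let value := kv.2.headD ""
      if PySem.Str.strIsdigit value then (st.1, st.2.1 ++ [kv], st.2.2)
      else if PySem.Str.len value > st.1 then (PySem.Str.len value, st.2.1, st.2.2 ++ [kv])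
      else (st.1, st.2.1, st.2.2 ++ [kv]))
    (0, ([], []))
  let longest := s1.1
  let temp1 := s1.2.1
  let temp2 := s1.2.2
  let ord1 := (PySem.List.pyRange longest 0 (-1)).foldl
    (fun acc i =>
      temp2.foldl (fun acc kv => if ((kv.2.length : Int) == i) then acc ++ [kv.1] else acc) acc)
    ordered
  let longest2 := temp1.foldl
    (fun (m : Int) kv =>
      let value := kv.2.headD ""
      if PySem.Str.len value > m then PySem.Str.len value else m) 0
  (PySem.List.pyRange longest2 0 (-1)).foldl
    (fun acc i =>
      temp1.foldl (fun acc kv => if ((kv.2.length : Int) == i) then acc ++ [kv.1] else acc) acc)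
    ord1

-- ===== PORT B =====
-- Source B's per-part block: longest first-string length, buckets dict keyed by len(v)
-- (setdefault/append = Dict.modify with default []), emit buckets longest..1
def pvAppendPart (acc : List String) (part : List (String × List String)) : List String :=
  let longest := part.foldl (fun m kv => max m (kv.2.headD "").toList.length) 0
  let buckets := part.foldl
    (fun (d : PySem.Dict Nat (List String)) kv => d.modify kv.2.length [] (· ++ [kv.1]))
    PySem.Dict.empty
  ((List.range' 1 longest).reverse).foldl (fun a i => a ++ buckets.getD i []) acc

def find_mixed_alt (ordered : List String) (cog : List (String × List String)) : List String :=
  [false, true].foldl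
    (fun acc digits =>
      pvAppendPart acc (cog.filter (fun kv => PySem.Str.strIsdigit (kv.2.headD "") == digits)))
    ordered

-- ===== PRECONDITION & SPEC =====
-- Pre_ excludes exactly the inputs where some value list is empty: there Python A
-- (and Python B alike) raises IndexError on v[0].
def Pre_find_mixed (ordered : List String) (cog : List (String × List String)) : Prop :=
  ∀ kv ∈ cog, kv.2 ≠ []
instance (ordered : List String) (cog : List (String × List String)) : Decidable (Pre_find_mixed ordered cog) := by unfold Pre_find_mixed; infer_instance

def pvWitness_find_mixed : List String × (List (String × List String)) :=
  (["w"], [("a", ["x", "y"]), ("7", ["12"]), ("b", ["zzz"])])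

def Spec_find_mixed (ordered : List String) (cog : List (String × List String)) (out : List String) : Prop := out = find_mixed_alt ordered cog
instance (ordered : List String) (cog : List (String × List String)) (out : List String) : Decidable (Spec_find_mixed ordered cog out) := by unfold Spec_find_mixed; infer_instance

-- ===== CLAIM (what is proved, stated in full; the proofs are below) =====
def Claim_equal_find_mixed : Prop := ∀ (ordered : List String) (cog : List (String × List String)), Dom_find_mixed ordered cog → Pre_find_mixed ordered cog → Spec_find_mixed ordered cog (find_mixed ordered cog)

-- ===== LEMMAS AND PROOFS =====

def pvHdig (kv : String × List String) : Bool := PySem.Str.strIsdigit (kv.2.headD "")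
def pvWlen (kv : String × List String) : Nat := (kv.2.headD "").toList.length
def pvMaxW (g : List (String × List String)) : Nat :=
  g.foldl (fun m kv => max m (pvWlen kv)) 0
def pvSel (g : List (String × List String)) (i : Nat) : List String :=
  (g.filter (fun kv => kv.2.length == i)).map Prod.fst
def pvFlat (g : List (String × List String)) (L : Nat) : List String :=
  ((List.range' 1 L).reverse).flatMap (pvSel g)

-- A's first pass computes (max wlen over the non-digit items, digit items, non-digit items)
lemma pvAfold (cog : List (String × List String)) (m : Int)
    (t1 t2 : List (String × List String)) :
    cog.foldl
      (fun (st : Int × List (String × List String) × List (String × List String)) kv =>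
        let value := kv.2.headD ""
        if PySem.Str.strIsdigit value then (st.1, st.2.1 ++ [kv], st.2.2)
        else if PySem.Str.len value > st.1 then (PySem.Str.len value, st.2.1, st.2.2 ++ [kv])
        else (st.1, st.2.1, st.2.2 ++ [kv]))
      (m, t1, t2)
    = ((cog.filter (fun kv => !pvHdig kv)).foldl (fun n kv => max n ((pvWlen kv : Nat) : Int)) m,
       t1 ++ cog.filter pvHdig, t2 ++ cog.filter (fun kv => !pvHdig kv)) := by
  induction cog generalizing m t1 t2 with
  | nil => simp
  | cons kv tl ih =>
    rw [List.foldl_cons, List.filter_cons, List.filter_cons]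
    by_cases h : PySem.Str.strIsdigit (kv.2.headD "") = true
    · have h1 : pvHdig kv = true := h
      simp only [h, if_true, h1, Bool.not_true, Bool.false_eq_true, if_false]
      rw [ih]
      simp
    · have h1 : pvHdig kv = false := Bool.eq_false_iff.mpr h
      have htup : (if PySem.Str.len (kv.2.headD "") > m
            then (PySem.Str.len (kv.2.headD ""), t1, t2 ++ [kv]) else (m, t1, t2 ++ [kv]))
          = (max m ((pvWlen kv : Nat) : Int), t1, t2 ++ [kv]) := by
        rw [PySem.Str.len_eq]
        split_ifs with h2 <;> exact Prod.ext (by simp only [pvWlen]; omega) rfl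
      simp only [h, if_false, Bool.false_eq_true, h1, Bool.not_false, htup]
      rw [ih]
      simp

-- the Int max-fold is the cast of the Nat max-fold
lemma pvCastMax (g : List (String × List String)) (n : Nat) :
    g.foldl (fun m kv => max m ((pvWlen kv : Nat) : Int)) (n : Int)
      = ((g.foldl (fun m kv => max m (pvWlen kv)) n : Nat) : Int) := by
  induction g generalizing n with
  | nil => simp
  | cons kv tl ih =>
    simp only [List.foldl_cons, ← Nat.cast_max, ih]

-- A's second longest loop is the same max-fold
lemma pvIfMax (g : List (String × List String)) (m : Int) :
    g.foldl
      (fun (m : Int) kv =>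
        let value := kv.2.headD ""
        if PySem.Str.len value > m then PySem.Str.len value else m) m
    = g.foldl (fun n kv => max n ((pvWlen kv : Nat) : Int)) m := by
  induction g generalizing m with
  | nil => rfl
  | cons kv tl ih =>
    simp only [List.foldl_cons]
    have : (if PySem.Str.len (kv.2.headD "") > m then PySem.Str.len (kv.2.headD "") else m)
        = max m ((pvWlen kv : Nat) : Int) := by
      rw [PySem.Str.len_eq]
      simp only [pvWlen]
      split_ifs with h' <;> omega
    rw [this, ih]

-- descending range as a map over List.range
lemma pvDescEq (L : Nat) :
    (List.range' 1 L).reverse = (List.range L).map (fun k => L - k) := by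
  induction L with
  | zero => simp
  | succ n ih =>
    rw [List.range'_1_concat, List.range_succ_eq_map]
    simp only [List.reverse_append, List.reverse_singleton, List.map_cons, List.singleton_append]
    rw [ih]
    simp only [List.map_map]
    congr 1
    · omega
    · apply List.map_congr_left
      intro a _
      simp only [Function.comp_apply]
      omega

lemma pvPyRangeDesc (L : Nat) :
    PySem.List.pyRange (L : Int) 0 (-1) = (List.range L).map (fun k => ((L - k : Nat) : Int)) := by
  rcases Nat.eq_zero_or_pos L with h | h
  · simp [h, PySem.List.pyRange]
  · simp only [PySem.List.pyRange]
    rw [if_neg (by norm_num), if_neg (by norm_num), if_pos (by exact_mod_cast h)]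
    norm_num
    intro a ha
    omega

-- A's rescan loop over one part = acc ++ pvFlat g L
lemma pvGroupA (g : List (String × List String)) (L : Nat) (acc : List String) :
    (PySem.List.pyRange ((L : Nat) : Int) 0 (-1)).foldl
      (fun a i =>
        g.foldl (fun a kv => if ((kv.2.length : Int) == i) then a ++ [kv.1] else a) a) acc
    = acc ++ pvFlat g L := by
  have hsel : ∀ (i : Nat) (a : List String),
      g.foldl (fun a kv => if ((kv.2.length : Int) == (i : Int)) then a ++ [kv.1] else a) a
      = a ++ pvSel g i := by
    intro i a
    have : ∀ kv : String × List String,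
        (((kv.2.length : Int)) == ((i : Nat) : Int)) = (kv.2.length == i) := by
      intro kv
      rw [Bool.eq_iff_iff]
      simp
    simp only [this]
    exact PySem.List.foldl_append_if (fun kv => kv.2.length == i) Prod.fst g a
  rw [pvPyRangeDesc, List.foldl_map]
  have hs : ∀ (a : List String) (k : Nat),
      g.foldl (fun a kv => if ((kv.2.length : Int) == ((L - k : Nat) : Int))
        then a ++ [kv.1] else a) a = a ++ pvSel g (L - k) := fun a k => hsel (L - k) a
  simp only [hs]
  rw [PySem.List.foldl_append_eq_flatMap]
  unfold pvFlat
  rw [pvDescEq, List.flatMap_map]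

-- B's bucket dict: bucket i holds exactly the keys whose value list has length i, in order
lemma pvBucketsD (g : List (String × List String)) (i : Nat) :
    (g.foldl
      (fun (d : PySem.Dict Nat (List String)) kv => d.modify kv.2.length [] (· ++ [kv.1]))
      PySem.Dict.empty).getD i []
    = pvSel g i := by
  have hmap : g.foldl
      (fun (d : PySem.Dict Nat (List String)) kv => d.modify kv.2.length [] (· ++ [kv.1]))
      PySem.Dict.empty
      = (g.map (fun kv => (kv.2.length, kv.1))).foldl
          (fun (d : PySem.Dict Nat (List String)) p => d.modify p.1 [] (· ++ [p.2]))
          PySem.Dict.empty := by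
    rw [List.foldl_map]
  rw [hmap, PySem.Dict.getD_foldl_modify_append]
  rw [PySem.Dict.getD_empty, List.nil_append]
  unfold pvSel
  rw [List.filter_map, List.map_map]
  rfl

-- B's per-part block = acc ++ pvFlat part (pvMaxW part)
lemma pvGroupB (g : List (String × List String)) (acc : List String) :
    pvAppendPart acc g = acc ++ pvFlat g (pvMaxW g) := by
  unfold pvAppendPart
  have hL : g.foldl (fun m kv => max m (kv.2.headD "").toList.length) 0 = pvMaxW g := rfl
  simp only [hL]
  rw [PySem.List.foldl_append_eq_flatMap]
  congr 1
  unfold pvFlat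
  simp only [List.flatMap_def]
  congr 1
  apply List.map_congr_left
  intro i _
  rw [pvBucketsD]

-- canonical form of port A
lemma pvA_eq (ordered : List String) (cog : List (String × List String)) :
    find_mixed ordered cog
      = ordered ++ pvFlat (cog.filter (fun kv => !pvHdig kv)) (pvMaxW (cog.filter (fun kv => !pvHdig kv)))
                ++ pvFlat (cog.filter pvHdig) (pvMaxW (cog.filter pvHdig)) := by
  unfold find_mixed
  rw [pvAfold cog 0 [] []]
  simp only [List.nil_append]
  have c1 := pvCastMax (cog.filter (fun kv => !pvHdig kv)) 0
  rw [Nat.cast_zero] at c1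
  have c2 := pvCastMax (cog.filter pvHdig) 0
  rw [Nat.cast_zero] at c2
  rw [c1, pvGroupA, pvIfMax, c2, pvGroupA]
  unfold pvMaxW
  rw [List.append_assoc]

-- canonical form of port B
lemma pvB_eq (ordered : List String) (cog : List (String × List String)) :
    find_mixed_alt ordered cog
      = ordered ++ pvFlat (cog.filter (fun kv => !pvHdig kv)) (pvMaxW (cog.filter (fun kv => !pvHdig kv)))
                ++ pvFlat (cog.filter pvHdig) (pvMaxW (cog.filter pvHdig)) := by
  unfold find_mixed_alt
  simp only [List.foldl_cons, List.foldl_nil]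
  have hf : cog.filter (fun kv => PySem.Str.strIsdigit (kv.2.headD "") == false)
      = cog.filter (fun kv => !pvHdig kv) :=
    List.filter_congr (fun kv _ => by simp [pvHdig])
  have ht : cog.filter (fun kv => PySem.Str.strIsdigit (kv.2.headD "") == true)
      = cog.filter pvHdig :=
    List.filter_congr (fun kv _ => by simp [pvHdig])
  rw [hf, ht, pvGroupB, pvGroupB, List.append_assoc]

-- ===== VERDICT (by name: the statement is the Claim_ definition above) =====
theorem find_mixed_spec : Claim_equal_find_mixed := by
  intro ordered cog _ _
  show find_mixed ordered cog = find_mixed_alt ordered cog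
  rw [pvA_eq, pvB_eq]
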